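-- pv_equiv track=rewrite | github.com/AurelienColin/MAL_recommendations | plot.py | get_widths
-- ===== SOURCE A (Python) =====
-- def get_widths(id2title, recommendations):
--     anime_widths = {}
--     for anime_id in id2title:
--         anime_widths[anime_id] = 0
--         for (k1, k2), n in recommendations.items():
--             if anime_id == k1 or anime_id == k2:
--                 anime_widths[anime_id] += recommendations[(k1, k2)]
--     return anime_widths
-- ===== SOURCE B (Python) =====
-- def get_widths(id2title, recommendations):
--     widths = {}
--     for (k1, k2), n in recommendations.items():
--         widths[k1] = widths.get(k1, 0) + n
--         if k2 != k1:
--             widths[k2] = widths.get(k2, 0) + n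
--     return {anime_id: widths.get(anime_id, 0) for anime_id in id2title}
-- ===== Notes on version B (the rewrite author's own statement) =====
-- stated objective: faster
-- what changed: Replaces the nested loop (for every anime id, scan all recommendations) with a single pass over the recommendations that adds each weight to both endpoint ids (once if they coincide), then reads the totals off per id.
import Mathlib
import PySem

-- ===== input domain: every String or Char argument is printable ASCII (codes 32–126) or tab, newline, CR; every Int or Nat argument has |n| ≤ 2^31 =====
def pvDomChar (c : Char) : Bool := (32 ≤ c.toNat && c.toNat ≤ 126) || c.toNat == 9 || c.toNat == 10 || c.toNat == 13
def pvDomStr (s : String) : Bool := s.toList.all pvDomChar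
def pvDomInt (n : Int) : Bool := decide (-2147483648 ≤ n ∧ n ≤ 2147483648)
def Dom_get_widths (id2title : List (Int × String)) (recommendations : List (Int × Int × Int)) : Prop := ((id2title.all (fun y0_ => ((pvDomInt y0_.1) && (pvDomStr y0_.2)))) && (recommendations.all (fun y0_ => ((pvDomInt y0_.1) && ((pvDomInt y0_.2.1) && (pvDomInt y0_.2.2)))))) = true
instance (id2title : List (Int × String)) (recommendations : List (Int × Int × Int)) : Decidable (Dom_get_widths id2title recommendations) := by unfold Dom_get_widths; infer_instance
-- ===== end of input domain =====

-- B replaces A's nested scan (every anime id × every recommendation) by one pass over the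
-- recommendations adding each weight to its two endpoints; objective: faster.

-- ===== PORT A =====
-- A iterates over the keys of id2title, and for each scans all recommendation items,
-- accumulating into anime_widths[anime_id] (dicts modelled by PySem.Dict, built from the lists).
def get_widths (id2title : List (Int × String)) (recommendations : List (Int × Int × Int)) : List (Int × Int) :=
  let recd : PySem.Dict (Int × Int) Int :=
    PySem.Dict.ofList (recommendations.map (fun t => ((t.1, t.2.1), t.2.2)))
  let ids : List Int := (PySem.Dict.ofList id2title).keys
  (ids.foldl (fun aw anime_id =>
      recd.items.foldl (fun aw kv =>
          if anime_id == kv.1.1 || anime_id == kv.1.2 then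
            aw.insert anime_id (aw.getD anime_id 0 + recd.getD kv.1 0)
          else aw)
        (aw.insert anime_id 0))
    PySem.Dict.empty).items

-- ===== PORT B =====
def get_widths_alt (id2title : List (Int × String)) (recommendations : List (Int × Int × Int)) : List (Int × Int) :=
  let recd : PySem.Dict (Int × Int) Int :=
    PySem.Dict.ofList (recommendations.map (fun t => ((t.1, t.2.1), t.2.2)))
  let widths : PySem.Dict Int Int :=
    recd.items.foldl (fun w kv =>
      let w1 := w.insert kv.1.1 (w.getD kv.1.1 0 + kv.2)
      if kv.1.2 ≠ kv.1.1 then w1.insert kv.1.2 (w1.getD kv.1.2 0 + kv.2) else w1)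
      PySem.Dict.empty
  (PySem.Dict.ofList id2title).keys.map (fun anime_id => (anime_id, widths.getD anime_id 0))

-- ===== PRECONDITION & SPEC =====
def Spec_get_widths (id2title : List (Int × String)) (recommendations : List (Int × Int × Int)) (out : List (Int × Int)) : Prop := out = get_widths_alt id2title recommendations
instance (id2title : List (Int × String)) (recommendations : List (Int × Int × Int)) (out : List (Int × Int)) : Decidable (Spec_get_widths id2title recommendations out) := by unfold Spec_get_widths; infer_instance

-- ===== CLAIM (what is proved, stated in full; the proofs are below) =====
def Claim_equal_get_widths : Prop := ∀ (id2title : List (Int × String)) (recommendations : List (Int × Int × Int)), Dom_get_widths id2title recommendations → Spec_get_widths id2title recommendations (get_widths id2title recommendations)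

-- ===== LEMMAS AND PROOFS =====

-- re-inserting a key's current value changes nothing (keys unique)
theorem pv_insert_getD_self_eq (d : PySem.Dict Int Int) (id : Int)
    (h : d.keys.Nodup) (hc : d.contains id = true) :
    d.insert id (d.getD id 0) = d := by
  apply PySem.Dict.ext
  rw [PySem.Dict.items_insert_of_contains d (d.getD id 0) hc]
  refine (List.map_congr_left ?_).trans (List.map_id _)
  intro p hp
  by_cases hpi : p.1 = id
  · subst hpi
    have : d.getD p.1 0 = p.2 := PySem.Dict.getD_of_mem_items d (Prod.mk.eta ▸ hp) h 0
    simp [this]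
  · simp [hpi]

-- A's inner loop: only the entry at `id` moves, by the sum of matching weights
theorem pv_innerA (g : (Int × Int) × Int → Int) (l : List ((Int × Int) × Int))
    (aw : PySem.Dict Int Int) (id : Int) (h : aw.keys.Nodup) (hc : aw.contains id = true) :
    l.foldl (fun aw kv => if id == kv.1.1 || id == kv.1.2 then
        aw.insert id (aw.getD id 0 + g kv) else aw) aw
      = aw.insert id (aw.getD id 0 +
          ((l.filter (fun kv => id == kv.1.1 || id == kv.1.2)).map g).sum) := by
  induction l generalizing aw with
  | nil => simp [pv_insert_getD_self_eq aw id h hc]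
  | cons kv t ih =>
    by_cases hm : (id == kv.1.1 || id == kv.1.2) = true
    · rw [List.foldl_cons, if_pos hm,
        ih _ (PySem.Dict.nodup_keys_insert aw id _ h) (PySem.Dict.contains_insert_self aw id _),
        PySem.Dict.insert_insert_self, PySem.Dict.getD_insert_self,
        List.filter_cons_of_pos (p := fun kv : (Int × Int) × Int => id == kv.1.1 || id == kv.1.2) hm,
        List.map_cons, List.sum_cons, add_assoc]
    · rw [List.foldl_cons, if_neg hm,
        List.filter_cons_of_neg (p := fun kv : (Int × Int) × Int => id == kv.1.1 || id == kv.1.2) hm]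
      exact ih aw h hc

-- A's outer loop appends one finished entry per (distinct, fresh) id
theorem pv_outerA (g : (Int × Int) × Int → Int) (items : List ((Int × Int) × Int))
    (ids : List Int) (aw : PySem.Dict Int Int)
    (hnd : ids.Nodup) (hk : aw.keys.Nodup) (hf : ∀ id ∈ ids, aw.contains id = false) :
    (ids.foldl (fun aw anime_id =>
        items.foldl (fun aw kv => if anime_id == kv.1.1 || anime_id == kv.1.2 then
            aw.insert anime_id (aw.getD anime_id 0 + g kv) else aw)
          (aw.insert anime_id 0)) aw).items
      = aw.items ++ ids.map (fun id =>
          (id, ((items.filter (fun kv => id == kv.1.1 || id == kv.1.2)).map g).sum)) := by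
  induction ids generalizing aw with
  | nil => simp
  | cons id t ih =>
    obtain ⟨hni, hndt⟩ := List.nodup_cons.mp hnd
    have hfid : aw.contains id = false := hf id (List.mem_cons_self ..)
    simp only [List.foldl_cons, List.map_cons]
    rw [pv_innerA g items (aw.insert id 0) id (PySem.Dict.nodup_keys_insert aw id 0 hk)
        (PySem.Dict.contains_insert_self aw id 0),
      PySem.Dict.getD_insert_self, PySem.Dict.insert_insert_self]
    rw [ih _ hndt (PySem.Dict.nodup_keys_insert aw id _ hk) ?_]
    · rw [PySem.Dict.items_insert_of_not_contains aw _ hfid]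
      simp
    · intro id' hid'
      rw [PySem.Dict.contains_insert]
      have : id' ≠ id := fun e => hni (e ▸ hid')
      simp [this, hf id' (List.mem_cons_of_mem _ hid')]

-- B's single pass: the total at `id` grows by each weight whose edge touches `id`
theorem pv_foldB (l : List ((Int × Int) × Int)) (w : PySem.Dict Int Int) (id : Int) :
    (l.foldl (fun w kv =>
        let w1 := w.insert kv.1.1 (w.getD kv.1.1 0 + kv.2)
        if kv.1.2 ≠ kv.1.1 then w1.insert kv.1.2 (w1.getD kv.1.2 0 + kv.2) else w1) w).getD id 0
      = w.getD id 0 + ((l.filter (fun kv => id == kv.1.1 || id == kv.1.2)).map (·.2)).sum := by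
  induction l generalizing w with
  | nil => simp
  | cons kv t ih =>
    obtain ⟨⟨k1, k2⟩, n⟩ := kv
    simp only [List.foldl_cons]
    rw [ih]
    by_cases h21 : k2 = k1 <;> by_cases h1 : id = k1 <;> by_cases h2 : id = k2 <;>
      simp_all [PySem.Dict.getD_insert] <;> ring

-- ===== VERDICT (by name: the statement is the Claim_ definition above) =====
theorem get_widths_spec : Claim_equal_get_widths := by
  intro id2title recommendations _
  unfold Spec_get_widths get_widths get_widths_alt
  dsimp only
  rw [pv_outerA (fun kv => (PySem.Dict.ofList (recommendations.map (fun t => ((t.1, t.2.1), t.2.2)))).getD kv.1 0)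
      _ _ _ (PySem.Dict.nodup_keys_ofList id2title) PySem.Dict.nodup_keys_empty
      (fun _ _ => PySem.Dict.contains_empty _)]
  rw [show (PySem.Dict.empty : PySem.Dict Int Int).items = [] from rfl, List.nil_append]
  refine List.map_congr_left ?_
  intro id _
  rw [pv_foldB, PySem.Dict.getD_empty, zero_add]
  refine congrArg (fun s => (id, s)) (congrArg List.sum (List.map_congr_left ?_))
  intro kv hkv
  exact PySem.Dict.getD_of_mem_items _ (Prod.mk.eta ▸ (List.mem_filter.mp hkv).1)
    (PySem.Dict.nodup_keys_ofList _) 0
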